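-- pv_equiv track=rewrite | github.com/pypi-data/pypi-mirror-403 | packages/escape-sdk/escape_sdk-2.2.1-py3-none-any.whl/escape/_internal/scraper/scraper.py | _split_into_inheritance_trees
-- ===== SOURCE A (Python) =====
-- from typing import Any
--
-- def _split_into_inheritance_trees(
--     class_list: list[tuple[str, Any]], child_to_parent: dict[str, str]
-- ) -> list[list[tuple[str, Any]]]:
--     """Split classes into separate inheritance trees based on shared ancestors."""
--     if len(class_list) == 1:
--         return [class_list]
--
--     # Extract simple names
--     class_info = []
--     for class_path, generic_type in class_list:
--         simple_name = class_path.split("/")[-1]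
--         class_info.append((class_path, simple_name, generic_type))
--
--     # Build ancestor sets for each class
--     def get_all_ancestors(class_name: str) -> set[str]:
--         """Get all ancestors including the class itself"""
--         ancestors = {class_name}
--         current = class_name
--         seen = set()
--
--         while current in child_to_parent and current not in seen:
--             seen.add(current)
--             parent = child_to_parent[current]
--             ancestors.add(parent)
--             current = parent
--
--         return ancestors
--
--     # Group classes that share any ancestor
--     trees = []
--     assigned = set()
--
--     for i, (path_i, name_i, gen_i) in enumerate(class_info):
--         if i in assigned:
--             continue
--
--         # Start a new tree with this class
--         tree = [(path_i, gen_i)]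
--         assigned.add(i)
--         ancestors_i = get_all_ancestors(name_i)
--
--         # Find all other classes that share ancestors with this tree
--         for j, (path_j, name_j, gen_j) in enumerate(class_info):
--             if j in assigned:
--                 continue
--
--             ancestors_j = get_all_ancestors(name_j)
--
--             # If they share any ancestor, they're in the same tree
--             if ancestors_i & ancestors_j:
--                 tree.append((path_j, gen_j))
--                 assigned.add(j)
--                 # Expand the ancestor set to include this new class's ancestors
--                 ancestors_i |= ancestors_j
--
--         trees.append(tree)
--
--     return trees
-- ===== SOURCE B (Python) =====
-- from typing import Any
--
-- def _split_into_inheritance_trees(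
--     class_list: list[tuple[str, Any]], child_to_parent: dict[str, str]
-- ) -> list[list[tuple[str, Any]]]:
--     """Split classes into separate inheritance trees based on shared ancestors.
--
--     Two classes share an ancestor iff their parent-chains end in the same root
--     (or the same cycle), so we bucket every class under one canonical key --
--     the chain's root, or the smallest member of its terminal cycle -- with a
--     single ordered dict, no pairwise ancestor-set intersections at all.
--     """
--
--     def canonical_key(name: str) -> str:
--         seen: list[str] = []
--         cur = name
--         while cur in child_to_parent and cur not in seen:
--             seen.append(cur)
--             cur = child_to_parent[cur]
--         if cur in child_to_parent:
--             # stopped on a repeat: cur starts the terminal cycle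
--             return min(seen[seen.index(cur):])
--         return cur
--
--     groups: dict[str, list[tuple[str, Any]]] = {}
--     for path, generic_type in class_list:
--         key = canonical_key(path.split("/")[-1])
--         groups.setdefault(key, []).append((path, generic_type))
--     return list(groups.values())
-- ===== Notes on version B (the rewrite author's own statement) =====
-- stated objective: faster
-- what changed: B replaces A's quadratic greedy pass with pairwise ancestor-set intersections by a single dict group-by: each class is bucketed under one canonical key (its parent-chain's root, or the minimum of its terminal cycle), which is equal for two classes exactly when their ancestor chains intersect, so no set intersections or unions are needed at all.
import Mathlib
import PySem

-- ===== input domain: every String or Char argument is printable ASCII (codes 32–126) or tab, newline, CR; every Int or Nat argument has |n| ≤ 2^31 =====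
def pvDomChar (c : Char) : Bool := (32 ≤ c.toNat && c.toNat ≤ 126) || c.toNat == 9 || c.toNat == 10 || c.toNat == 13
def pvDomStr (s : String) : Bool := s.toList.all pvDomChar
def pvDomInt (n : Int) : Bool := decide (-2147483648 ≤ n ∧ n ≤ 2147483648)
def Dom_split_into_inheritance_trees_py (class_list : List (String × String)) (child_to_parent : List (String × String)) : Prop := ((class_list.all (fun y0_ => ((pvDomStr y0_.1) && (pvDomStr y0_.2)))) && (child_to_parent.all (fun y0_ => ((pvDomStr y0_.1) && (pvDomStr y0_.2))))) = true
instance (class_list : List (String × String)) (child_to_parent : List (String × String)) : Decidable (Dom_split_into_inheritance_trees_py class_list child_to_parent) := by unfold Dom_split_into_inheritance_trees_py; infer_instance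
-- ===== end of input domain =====

-- B replaces A's quadratic greedy pass with pairwise ancestor-set intersections by a single
-- dict group-by under a canonical key (the parent-chain's root, or the minimum of its terminal
-- cycle); two classes get the same key exactly when their ancestor chains intersect.

-- shared helper of both sources: path.split("/")[-1] (split(sep) is never empty, so the default is unreachable)
def pvLastComp (p : String) : String :=
  (PySem.List.pyGet? ((PySem.Str.split? p "/").getD []) (-1)).getD ""

-- ===== PORT A =====

-- A's get_all_ancestors (while loop over child_to_parent with a `seen` set)
def pvAncLoop (d : List (String × String)) (ancestors : PySem.Set String)
    (current : String) (seen : PySem.Set String) : PySem.Set String :=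
  match hp : (PySem.Dict.mk d).get? current with
  | some parent =>
      if hs : PySem.Set.contains seen current = true then ancestors
      else pvAncLoop d (PySem.Set.add ancestors parent) parent (PySem.Set.add seen current)
  | none => ancestors
termination_by (((PySem.Dict.mk d).keys).filter (fun k => !(PySem.Set.contains seen k))).length
decreasing_by
  have hmem : current ∈ (PySem.Dict.mk d).keys := by
    rw [← PySem.Dict.contains_iff_mem_keys, PySem.Dict.contains_eq_isSome_get?, hp]; rfl
  have hns : current ∉ seen := by
    intro h; exact hs ((PySem.Set.contains_iff seen current).mpr h)
  have hadd : PySem.Set.add seen current = seen ++ [current] := PySem.Set.add_of_not_mem hns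
  have hflt : ((PySem.Dict.mk d).keys).filter (fun k => !(PySem.Set.contains (PySem.Set.add seen current) k))
      = (((PySem.Dict.mk d).keys).filter (fun k => !(PySem.Set.contains seen k))).filter (fun k => !(k == current)) := by
    rw [List.filter_filter]
    apply List.filter_congr
    intro k _
    rw [hadd]
    by_cases hk : k = current <;> by_cases hksn : k ∈ seen <;> simp [hk, hksn]
  rw [hflt]
  have hin : current ∈ ((PySem.Dict.mk d).keys).filter (fun k => !(PySem.Set.contains seen k)) := by
    simp only [List.mem_filter]
    exact ⟨hmem, by simp [PySem.Set.contains, hns]⟩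
  calc ((((PySem.Dict.mk d).keys).filter (fun k => !(PySem.Set.contains seen k))).filter (fun k => !(k == current))).length
      < (((PySem.Dict.mk d).keys).filter (fun k => !(PySem.Set.contains seen k))).length := by
        apply List.length_filter_lt_length_iff_exists.mpr
        exact ⟨current, hin, by simp⟩

def pvAncestors (d : List (String × String)) (class_name : String) : PySem.Set String :=
  pvAncLoop d (PySem.Set.ofList [class_name]) class_name (PySem.Set.empty)

-- inner loop body of A (`for j, (path_j, name_j, gen_j) in enumerate(class_info)`); state (tree, assigned, ancestors_i)
def pvInnerStep (d : List (String × String))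
    (st2 : List (String × String) × PySem.Set Int × PySem.Set String)
    (je : Int × (String × String × String)) :
    List (String × String) × PySem.Set Int × PySem.Set String :=
  if PySem.Set.contains st2.2.1 je.1 then st2
  else
    let anc_j := pvAncestors d je.2.2.1
    if !(PySem.Set.inter st2.2.2 anc_j).isEmpty then
      (st2.1 ++ [(je.2.1, je.2.2.2)], PySem.Set.add st2.2.1 je.1, PySem.Set.union st2.2.2 anc_j)
    else st2

-- outer loop body of A; state (trees, assigned)
def pvOuterStep (d : List (String × String)) (class_info : List (String × String × String))
    (st : List (List (String × String)) × PySem.Set Int)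
    (ie : Int × (String × String × String)) :
    List (List (String × String)) × PySem.Set Int :=
  if PySem.Set.contains st.2 ie.1 then st
  else
    let tree : List (String × String) := [(ie.2.1, ie.2.2.2)]
    let assigned := PySem.Set.add st.2 ie.1
    let anc_i := pvAncestors d ie.2.2.1
    let r := (PySem.List.enumerate class_info 0).foldl (pvInnerStep d) (tree, assigned, anc_i)
    (st.1 ++ [r.1], r.2.1)

def split_into_inheritance_trees_py (class_list : List (String × String)) (child_to_parent : List (String × String)) : List (List (String × String)) :=
  if class_list.length == 1 then [class_list]
  else
    let class_info := class_list.map (fun cp => (cp.1, pvLastComp cp.1, cp.2))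
    ((PySem.List.enumerate class_info 0).foldl (pvOuterStep child_to_parent class_info)
      ([], (PySem.Set.empty : PySem.Set Int))).1

-- ===== PORT B =====

-- B's canonical_key while loop: `seen` is a python list (append + membership)
def pvCanonLoop (d : List (String × String)) (seen : List String) (cur : String) :
    List String × String :=
  match hp : (PySem.Dict.mk d).get? cur with
  | some parent =>
      if hs : cur ∈ seen then (seen, cur)
      else pvCanonLoop d (seen ++ [cur]) parent
  | none => (seen, cur)
termination_by (((PySem.Dict.mk d).keys).filter (fun k => !(decide (k ∈ seen)))).length
decreasing_by
  have hmem : cur ∈ (PySem.Dict.mk d).keys := by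
    rw [← PySem.Dict.contains_iff_mem_keys, PySem.Dict.contains_eq_isSome_get?, hp]; rfl
  have hflt : ((PySem.Dict.mk d).keys).filter (fun k => !(decide (k ∈ seen ++ [cur])))
      = (((PySem.Dict.mk d).keys).filter (fun k => !(decide (k ∈ seen)))).filter (fun k => !(k == cur)) := by
    rw [List.filter_filter]
    apply List.filter_congr
    intro k _
    by_cases hk : k = cur <;> by_cases hksn : k ∈ seen <;> simp [hk, hksn]
  rw [hflt]
  have hin : cur ∈ ((PySem.Dict.mk d).keys).filter (fun k => !(decide (k ∈ seen))) := by
    simp only [List.mem_filter]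
    exact ⟨hmem, by simp [hs]⟩
  calc ((((PySem.Dict.mk d).keys).filter (fun k => !(decide (k ∈ seen)))).filter (fun k => !(k == cur))).length
      < (((PySem.Dict.mk d).keys).filter (fun k => !(decide (k ∈ seen)))).length := by
        apply List.length_filter_lt_length_iff_exists.mpr
        exact ⟨cur, hin, by simp⟩

-- B's canonical_key: the chain's root, or min of its terminal cycle.
-- (When the branch is taken, `cur` is in `seen`, so index? is some and the
-- sliced segment is nonempty: both getD defaults are unreachable.)
def pvCanonKey (d : List (String × String)) (name : String) : String :=
  let r := pvCanonLoop d [] name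
  if (PySem.Dict.mk d).contains r.2 then
    (PySem.List.min? (PySem.List.slice r.1
        (some (((PySem.List.index? r.1 r.2).getD 0 : Nat) : Int)) none) (fun y => y)).getD ""
  else r.2

-- B's group-by loop: groups.setdefault(key, []).append(item) is Dict.modify key [] (· ++ [item])
def split_into_inheritance_trees_py_alt (class_list : List (String × String)) (child_to_parent : List (String × String)) : List (List (String × String)) :=
  (class_list.foldl
    (fun g cp => g.modify (pvCanonKey child_to_parent (pvLastComp cp.1)) [] (fun v => v ++ [cp]))
    (PySem.Dict.empty : PySem.Dict String (List (String × String)))).values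

-- ===== PRECONDITION & SPEC =====
def Spec_split_into_inheritance_trees_py (class_list : List (String × String)) (child_to_parent : List (String × String)) (out : List (List (String × String))) : Prop := out = split_into_inheritance_trees_py_alt class_list child_to_parent
instance (class_list : List (String × String)) (child_to_parent : List (String × String)) (out : List (List (String × String))) : Decidable (Spec_split_into_inheritance_trees_py class_list child_to_parent out) := by unfold Spec_split_into_inheritance_trees_py; infer_instance

-- ===== CLAIM (what is proved, stated in full; the proofs are below) =====
def Claim_equal_split_into_inheritance_trees_py : Prop := ∀ (class_list : List (String × String)) (child_to_parent : List (String × String)), Dom_split_into_inheritance_trees_py class_list child_to_parent → Spec_split_into_inheritance_trees_py class_list child_to_parent (split_into_inheritance_trees_py class_list child_to_parent)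

-- ===== LEMMAS AND PROOFS =====

-- ---------- reachability along child_to_parent ----------

inductive pvReach (d : List (String × String)) : String → String → Prop
  | refl (x : String) : pvReach d x x
  | step {x y z : String} : (PySem.Dict.mk d).get? x = some y → pvReach d y z → pvReach d x z

theorem pvReach.trans {d : List (String × String)} {a b c : String}
    (h1 : pvReach d a b) (h2 : pvReach d b c) : pvReach d a c := by
  induction h1 with
  | refl => exact h2
  | step hxy _ ih => exact pvReach.step hxy (ih h2)

-- ---------- the run of pvCanonLoop ----------

theorem pvCanonLoop_none {d : List (String × String)} {seen : List String} {cur : String}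
    (h : (PySem.Dict.mk d).get? cur = none) : pvCanonLoop d seen cur = (seen, cur) := by
  rw [pvCanonLoop]; split <;> simp_all

theorem pvCanonLoop_mem {d : List (String × String)} {seen : List String} {cur : String}
    {p : String} (h : (PySem.Dict.mk d).get? cur = some p) (hm : cur ∈ seen) :
    pvCanonLoop d seen cur = (seen, cur) := by
  rw [pvCanonLoop]; split <;> simp_all

theorem pvCanonLoop_step {d : List (String × String)} {seen : List String} {cur : String}
    {p : String} (h : (PySem.Dict.mk d).get? cur = some p) (hm : cur ∉ seen) :
    pvCanonLoop d seen cur = pvCanonLoop d (seen ++ [cur]) p := by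
  conv_lhs => rw [pvCanonLoop]
  split
  · rename_i p' hp'
    rw [h] at hp'; cases hp'
    simp [hm]
  · simp_all

def pvStepR (d : List (String × String)) (a b : String) : Prop :=
  (PySem.Dict.mk d).get? a = some b

-- full description of one run of pvCanonLoop
theorem pvCanonLoop_spec (d : List (String × String)) (seen : List String) (cur : String) :
    ∃ t : List String,
      (pvCanonLoop d seen cur).1 = seen ++ t ∧
      (t ++ [(pvCanonLoop d seen cur).2]).head? = some cur ∧
      List.IsChain (pvStepR d) (t ++ [(pvCanonLoop d seen cur).2]) ∧
      ((PySem.Dict.mk d).get? (pvCanonLoop d seen cur).2 = none ∨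
        (pvCanonLoop d seen cur).2 ∈ seen ++ t) ∧
      (∀ v ∈ t, v ∉ seen) ∧ t.Nodup := by
  induction seen, cur using pvCanonLoop.induct d with
  | case1 seen cur p hp hm =>
      refine ⟨[], ?_⟩
      rw [pvCanonLoop_mem hp hm]
      simp [hm]
  | case2 seen cur p hp hm ih =>
      rw [pvCanonLoop_step hp hm] at *
      obtain ⟨t', h1, h2, h3, h4, h5, h6⟩ := ih
      refine ⟨cur :: t', ?_, ?_, ?_, ?_, ?_, ?_⟩
      · simpa using h1
      · simp
      · refine List.IsChain.cons h3 ?_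
        intro y hy
        simp only [List.append_eq] at hy
        rw [h2] at hy
        cases hy
        exact hp
      · rcases h4 with h | h
        · exact Or.inl h
        · right
          rcases List.mem_append.mp h with h | h
          · rcases List.mem_append.mp h with h | h
            · simp [h]
            · simp at h; simp [h]
          · simp [h]
      · intro v hv
        rcases List.mem_cons.mp hv with h | h
        · exact h ▸ hm
        · intro hvs; exact h5 v h (List.mem_append.mpr (Or.inl hvs))
      · refine List.nodup_cons.mpr ⟨?_, h6⟩
        intro hc
        exact h5 cur hc (by simp)
  | case3 seen cur hp =>
      refine ⟨[], ?_⟩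
      rw [pvCanonLoop_none hp]
      simp [hp]

-- ---------- the run from an empty seen list ----------

def pvRunS (d : List (String × String)) (x : String) : List String := (pvCanonLoop d [] x).1
def pvRunC (d : List (String × String)) (x : String) : String := (pvCanonLoop d [] x).2
def pvTrace (d : List (String × String)) (x : String) : List String := pvRunS d x ++ [pvRunC d x]

theorem pvRun_facts (d : List (String × String)) (x : String) :
    (pvTrace d x).head? = some x ∧ List.IsChain (pvStepR d) (pvTrace d x) ∧
    ((PySem.Dict.mk d).get? (pvRunC d x) = none ∨ pvRunC d x ∈ pvRunS d x) ∧
    (pvRunS d x).Nodup := by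
  obtain ⟨t, h1, h2, h3, h4, h5, h6⟩ := pvCanonLoop_spec d [] x
  simp only [List.nil_append] at h1 h4
  unfold pvTrace pvRunS pvRunC
  rw [h1]
  exact ⟨h2, h3, h4, h1 ▸ h6⟩

theorem pvChain_reach (d : List (String × String)) :
    ∀ (l : List String) (x : String), List.IsChain (pvStepR d) l → l.head? = some x →
      ∀ v ∈ l, pvReach d x v := by
  intro l
  induction l with
  | nil => simp
  | cons a t ih =>
      intro x hch hh v hv
      have hax : a = x := by simpa using hh
      subst hax
      rcases List.mem_cons.mp hv with h | h
      · rw [h]; exact pvReach.refl a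
      · cases t with
        | nil => simp at h
        | cons b t' =>
            obtain ⟨hstep, hch'⟩ := List.isChain_cons_cons.mp hch
            exact pvReach.step hstep (ih b hch' rfl v h)

theorem pvChain_closed (d : List (String × String)) (s : List String) (c : String)
    (hch : List.IsChain (pvStepR d) (s ++ [c]))
    (hterm : (PySem.Dict.mk d).get? c = none ∨ c ∈ s) :
    ∀ v ∈ s ++ [c], ∀ w, (PySem.Dict.mk d).get? v = some w → w ∈ s ++ [c] := by
  intro v hv w hw
  by_cases hvs : v ∈ s
  · have hi : s.idxOf v < s.length := List.idxOf_lt_length_of_mem hvs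
    have hil : s.idxOf v < (s ++ [c]).length := by simp; omega
    have hgv : (s ++ [c])[s.idxOf v]'hil = v := by
      rw [List.getElem_append_left hi]
      exact List.getElem_idxOf hi
    have hi1 : s.idxOf v + 1 < (s ++ [c]).length := by simp; omega
    have hstep := List.isChain_iff_getElem.mp hch (s.idxOf v) hi1
    rw [hgv] at hstep
    unfold pvStepR at hstep
    rw [hw] at hstep
    have := Option.some_injective _ hstep
    rw [this]
    exact List.getElem_mem _
  · have hvc : v = c := by
      rcases List.mem_append.mp hv with h | h
      · exact absurd h hvs
      · simpa using h
    subst hvc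
    rcases hterm with h | h
    · rw [h] at hw; cases hw
    · exact absurd h hvs

theorem pvReach_mem_of_mem (d : List (String × String)) (s : List String) (c : String)
    (hch : List.IsChain (pvStepR d) (s ++ [c]))
    (hterm : (PySem.Dict.mk d).get? c = none ∨ c ∈ s) :
    ∀ u v, u ∈ s ++ [c] → pvReach d u v → v ∈ s ++ [c] := by
  intro u v hu hr
  induction hr with
  | refl => exact hu
  | step h hr ih => exact ih (pvChain_closed d s c hch hterm _ hu _ h)

theorem pvMem_trace_iff_reach (d : List (String × String)) (x v : String) :
    v ∈ pvTrace d x ↔ pvReach d x v := by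
  obtain ⟨hh, hch, hterm, _⟩ := pvRun_facts d x
  constructor
  · exact fun hv => pvChain_reach d _ x hch hh v hv
  · intro hr
    have hx : x ∈ pvTrace d x := List.mem_of_mem_head? (by rw [hh]; rfl)
    exact pvReach_mem_of_mem d _ _ hch hterm x v hx hr

-- a prefix of `seen` disjoint from the walk does not change the run
theorem pvCanonLoop_prefix (d : List (String × String)) (pre : List String) :
    ∀ (seen : List String) (cur : String), (∀ p ∈ pre, ¬ pvReach d cur p) →
      pvCanonLoop d (pre ++ seen) cur =
        (pre ++ (pvCanonLoop d seen cur).1, (pvCanonLoop d seen cur).2) := by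
  intro seen cur
  induction seen, cur using pvCanonLoop.induct d with
  | case1 seen cur p hp hm =>
      intro _
      rw [pvCanonLoop_mem hp (List.mem_append.mpr (Or.inr hm)), pvCanonLoop_mem hp hm]
  | case2 seen cur p hp hm ih =>
      intro hpre
      have hcp : cur ∉ pre := fun hc => hpre cur hc (pvReach.refl cur)
      have hm' : cur ∉ pre ++ seen := by
        intro h
        rcases List.mem_append.mp h with h | h
        · exact hcp h
        · exact hm h
      rw [pvCanonLoop_step hp hm', pvCanonLoop_step hp hm, List.append_assoc]
      exact ih (fun q hq hr => hpre q hq (pvReach.step hp hr))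
  | case3 seen cur hp =>
      intro _
      rw [pvCanonLoop_none hp, pvCanonLoop_none hp]

-- ---------- the canonical key ----------

theorem pvIdxOf?_of_mem {l : List String} {a : String} (h : a ∈ l) :
    List.idxOf? a l = some (List.idxOf a l) := by
  induction l with
  | nil => simp at h
  | cons b t ih =>
      by_cases hb : b = a
      · subst hb; simp [List.idxOf?_cons, List.idxOf_cons_self]
      · have ht : a ∈ t := by
          rcases List.mem_cons.mp h with h' | h'
          · exact absurd h'.symm hb
          · exact h'
        rw [List.idxOf_cons_ne t hb, List.idxOf?_cons, if_neg (by simpa using hb), ih ht]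
        rfl

theorem pvCanonKey_def (d : List (String × String)) (name : String) :
    pvCanonKey d name =
      (if (PySem.Dict.mk d).contains (pvCanonLoop d [] name).2 = true then
        (PySem.List.min? (PySem.List.slice (pvCanonLoop d [] name).1
          (some (((PySem.List.index? (pvCanonLoop d [] name).1
            (pvCanonLoop d [] name).2).getD 0 : Nat) : Int)) none) (fun y => y)).getD ""
      else (pvCanonLoop d [] name).2) := rfl

theorem pvCanonKey_root (d : List (String × String)) (x : String)
    (h : (PySem.Dict.mk d).get? (pvRunC d x) = none) : pvCanonKey d x = pvRunC d x := by
  have hc : (PySem.Dict.mk d).contains (pvRunC d x) = false := by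
    rw [PySem.Dict.contains_eq_isSome_get?, h]; rfl
  rw [pvCanonKey_def, show (pvCanonLoop d [] x).2 = pvRunC d x from rfl, hc]
  simp

theorem pvCanonKey_cyc (d : List (String × String)) (x : String)
    (hsome : ((PySem.Dict.mk d).get? (pvRunC d x)).isSome = true) :
    pvCanonKey d x =
      (PySem.List.min? ((pvRunS d x).drop (List.idxOf (pvRunC d x) (pvRunS d x)))
        (fun y => y)).getD "" := by
  have hmem : pvRunC d x ∈ pvRunS d x := by
    rcases (pvRun_facts d x).2.2.1 with h | h
    · rw [h] at hsome; cases hsome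
    · exact h
  have hc : (PySem.Dict.mk d).contains (pvRunC d x) = true := by
    rw [PySem.Dict.contains_eq_isSome_get?, hsome]
  rw [pvCanonKey_def, show (pvCanonLoop d [] x).2 = pvRunC d x from rfl,
    show (pvCanonLoop d [] x).1 = pvRunS d x from rfl, hc]
  simp only [if_true]
  rw [PySem.List.index?_eq_idxOf?, pvIdxOf?_of_mem hmem]
  rw [show (some (List.idxOf (pvRunC d x) (pvRunS d x))).getD 0
      = List.idxOf (pvRunC d x) (pvRunS d x) from rfl]
  rw [PySem.List.slice_from_natCast]

-- the cycle segment holds exactly what is reachable from the terminal current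
theorem pvSeg_mem_iff (d : List (String × String)) (x : String)
    (hmem : pvRunC d x ∈ pvRunS d x) :
    ∀ v, v ∈ (pvRunS d x).drop (List.idxOf (pvRunC d x) (pvRunS d x)) ↔
      pvReach d (pvRunC d x) v := by
  obtain ⟨hh, hch, hterm, hnd⟩ := pvRun_facts d x
  set S := pvRunS d x with hS
  set c := pvRunC d x with hc
  set i := List.idxOf c S with hi
  have hilt : i < S.length := List.idxOf_lt_length_of_mem hmem
  have hcons : S.drop i = c :: S.drop (i + 1) := by
    rw [List.drop_eq_getElem_cons hilt]
    congr 1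
    exact List.getElem_idxOf hilt
  have hdrop : (pvTrace d x).drop i = S.drop i ++ [c] := by
    unfold pvTrace
    rw [← hS, ← hc, List.drop_append_of_le_length (le_of_lt hilt)]
  have hch' : List.IsChain (pvStepR d) (S.drop i ++ [c]) := by
    rw [← hdrop]; exact hch.drop i
  have hhead : (S.drop i ++ [c]).head? = some c := by
    rw [hcons]; rfl
  have hcmem : c ∈ S.drop i := by rw [hcons]; simp
  intro v
  constructor
  · intro hv
    exact pvChain_reach d _ c hch' hhead v (List.mem_append.mpr (Or.inl hv))
  · intro hr
    have hin := pvReach_mem_of_mem d (S.drop i) c hch' (Or.inr hcmem) c v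
      (List.mem_append.mpr (Or.inl hcmem)) hr
    rcases List.mem_append.mp hin with h | h
    · exact h
    · simp at h; rw [h]; exact hcmem

theorem pvMin_congr (l1 l2 : List String) (h : ∀ a, a ∈ l1 ↔ a ∈ l2) :
    PySem.List.min? l1 (fun y => y) = PySem.List.min? l2 (fun y => y) := by
  rcases hm1 : PySem.List.min? l1 (fun y => y) with _ | m1 <;>
    rcases hm2 : PySem.List.min? l2 (fun y => y) with _ | m2
  · rfl
  · have h1 : l1 = [] := (PySem.List.min?_eq_none_iff l1 _).mp hm1
    have := (h m2).mpr (PySem.List.min?_mem hm2)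
    rw [h1] at this; simp at this
  · have h2 : l2 = [] := (PySem.List.min?_eq_none_iff l2 _).mp hm2
    have := (h m1).mp (PySem.List.min?_mem hm1)
    rw [h2] at this; simp at this
  · have hle1 : m1 ≤ m2 := PySem.List.min?_isMin hm1 m2 ((h m2).mpr (PySem.List.min?_mem hm2))
    have hle2 : m2 ≤ m1 := PySem.List.min?_isMin hm2 m1 ((h m1).mp (PySem.List.min?_mem hm1))
    rw [le_antisymm hle1 hle2]

-- on a cycle, reachability is symmetric
theorem pvPeriodic (d : List (String × String)) (x y : String)
    (hxy : (PySem.Dict.mk d).get? x = some y) (hcyc : pvReach d y x) :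
    ∀ v, pvReach d x v → pvReach d v x := by
  have Q : ∀ a b, pvReach d a b → pvReach d x a → pvReach d a x → pvReach d b x := by
    intro a b hab
    induction hab with
    | refl => exact fun _ h => h
    | @step a a' b h hr ih =>
        intro hxa hax
        have hxa' : pvReach d x a' := hxa.trans (pvReach.step h (pvReach.refl a'))
        have ha'x : pvReach d a' x := by
          by_cases ha : a = x
          · subst ha
            rw [hxy] at h
            cases h
            exact hcyc
          · cases hax with
            | refl => exact absurd rfl ha
            | step h' hr' =>
                rw [h] at h'
                cases h'
                exact hr'
        exact ih hxa' ha'x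
  intro v hv
  exact Q x v hv (pvReach.refl x) (pvReach.refl x)

theorem pvRunC_mem_trace (d : List (String × String)) (x : String) :
    pvRunC d x ∈ pvTrace d x := by
  unfold pvTrace; simp

theorem pvReach_cases {d : List (String × String)} {a b : String} (h : pvReach d a b) :
    a = b ∨ ∃ w, (PySem.Dict.mk d).get? a = some w ∧ pvReach d w b := by
  cases h with
  | refl => exact Or.inl rfl
  | step h hr => exact Or.inr ⟨_, h, hr⟩

theorem pvKey_step (d : List (String × String)) (x y : String)
    (hxy : (PySem.Dict.mk d).get? x = some y) : pvCanonKey d x = pvCanonKey d y := by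
  have hrunx : pvCanonLoop d [] x = pvCanonLoop d [x] y := pvCanonLoop_step hxy (by simp)
  by_cases hcyc : pvReach d y x
  · -- x lies on a cycle: both keys are the min over the same cycle
    obtain ⟨z, hyz, hzy⟩ : ∃ z, (PySem.Dict.mk d).get? y = some z ∧ pvReach d z y := by
      by_cases hyx : y = x
      · subst hyx
        exact ⟨y, hxy, pvReach.refl y⟩
      · cases hcyc with
        | refl => exact absurd rfl hyx
        | step h hr =>
            exact ⟨_, h, hr.trans (pvReach.step hxy (pvReach.refl y))⟩
    have hperX := pvPeriodic d x y hxy hcyc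
    have hperY := pvPeriodic d y z hyz hzy
    have hxy' : pvReach d x y := pvReach.step hxy (pvReach.refl y)
    have hCx_back : pvReach d (pvRunC d x) x :=
      hperX _ ((pvMem_trace_iff_reach d x _).mp (pvRunC_mem_trace d x))
    have hCy_back : pvReach d (pvRunC d y) y :=
      hperY _ ((pvMem_trace_iff_reach d y _).mp (pvRunC_mem_trace d y))
    have hCx_some : ((PySem.Dict.mk d).get? (pvRunC d x)).isSome = true := by
      rcases hq : (PySem.Dict.mk d).get? (pvRunC d x) with _ | p
      · rcases pvReach_cases hCx_back with heq | ⟨w, hw, _⟩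
        · rw [heq] at hq; rw [hq] at hxy; cases hxy
        · rw [hq] at hw; cases hw
      · rfl
    have hCy_some : ((PySem.Dict.mk d).get? (pvRunC d y)).isSome = true := by
      rcases hq : (PySem.Dict.mk d).get? (pvRunC d y) with _ | p
      · rcases pvReach_cases hCy_back with heq | ⟨w, hw, _⟩
        · rw [heq] at hq; rw [hq] at hyz; cases hyz
        · rw [hq] at hw; cases hw
      · rfl
    have hCx_mem : pvRunC d x ∈ pvRunS d x := by
      rcases (pvRun_facts d x).2.2.1 with h | h
      · rw [h] at hCx_some; cases hCx_some
      · exact h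
    have hCy_mem : pvRunC d y ∈ pvRunS d y := by
      rcases (pvRun_facts d y).2.2.1 with h | h
      · rw [h] at hCy_some; cases hCy_some
      · exact h
    rw [pvCanonKey_cyc d x hCx_some, pvCanonKey_cyc d y hCy_some]
    congr 1
    apply pvMin_congr
    intro a
    rw [pvSeg_mem_iff d x hCx_mem a, pvSeg_mem_iff d y hCy_mem a]
    have hxCx : pvReach d x (pvRunC d x) :=
      (pvMem_trace_iff_reach d x _).mp (pvRunC_mem_trace d x)
    have hyCy : pvReach d y (pvRunC d y) :=
      (pvMem_trace_iff_reach d y _).mp (pvRunC_mem_trace d y)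
    constructor
    · intro h
      exact hCy_back.trans (hcyc.trans (hxCx.trans h))
    · intro h
      exact hCx_back.trans (hxy'.trans (hyCy.trans h))
  · -- x is not revisited: its run is y's run with x prepended
    have hx_trace : x ∉ pvTrace d y := fun h => hcyc ((pvMem_trace_iff_reach d y x).mp h)
    have hpre := pvCanonLoop_prefix d [x] [] y (by
      intro p hp
      simp only [List.mem_singleton] at hp
      subst hp
      exact hcyc)
    simp only [List.append_nil] at hpre
    have hSx : pvRunS d x = x :: pvRunS d y := by
      unfold pvRunS
      rw [hrunx, hpre]
      simp
    have hCx : pvRunC d x = pvRunC d y := by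
      unfold pvRunC
      rw [hrunx, hpre]
    rcases hq : (PySem.Dict.mk d).get? (pvRunC d y) with _ | p
    · rw [pvCanonKey_root d x (by rw [hCx]; exact hq), pvCanonKey_root d y hq, hCx]
    · have hsome : ((PySem.Dict.mk d).get? (pvRunC d y)).isSome = true := by rw [hq]; rfl
      have hCy_mem : pvRunC d y ∈ pvRunS d y := by
        rcases (pvRun_facts d y).2.2.1 with h | h
        · rw [h] at hsome; cases hsome
        · exact h
      have hne : x ≠ pvRunC d y := by
        intro h
        exact hx_trace (h ▸ pvRunC_mem_trace d y)
      rw [pvCanonKey_cyc d x (by rw [hCx]; exact hsome), pvCanonKey_cyc d y hsome, hCx, hSx]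
      rw [List.idxOf_cons_ne _ hne]
      rw [show (List.idxOf (pvRunC d y) (pvRunS d y)).succ
          = List.idxOf (pvRunC d y) (pvRunS d y) + 1 from rfl]
      rw [List.drop_succ_cons]

theorem pvKey_of_reach (d : List (String × String)) {x v : String} (h : pvReach d x v) :
    pvCanonKey d x = pvCanonKey d v := by
  induction h with
  | refl => rfl
  | step h _ ih => exact (pvKey_step _ _ _ h).trans ih

theorem pvReach_key (d : List (String × String)) (x : String) :
    pvReach d x (pvCanonKey d x) := by
  have hxC : pvReach d x (pvRunC d x) :=
    (pvMem_trace_iff_reach d x _).mp (pvRunC_mem_trace d x)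
  rcases hq : (PySem.Dict.mk d).get? (pvRunC d x) with _ | p
  · rw [pvCanonKey_root d x hq]
    exact hxC
  · have hsome : ((PySem.Dict.mk d).get? (pvRunC d x)).isSome = true := by rw [hq]; rfl
    have hmem : pvRunC d x ∈ pvRunS d x := by
      rcases (pvRun_facts d x).2.2.1 with h | h
      · rw [h] at hsome; cases hsome
      · exact h
    rw [pvCanonKey_cyc d x hsome]
    have hCseg : pvRunC d x ∈ (pvRunS d x).drop (List.idxOf (pvRunC d x) (pvRunS d x)) :=
      (pvSeg_mem_iff d x hmem _).mpr (pvReach.refl _)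
    rcases hm : PySem.List.min? ((pvRunS d x).drop (List.idxOf (pvRunC d x) (pvRunS d x)))
        (fun y => y) with _ | m
    · have := (PySem.List.min?_eq_none_iff _ _).mp hm
      rw [this] at hCseg; simp at hCseg
    · have hmseg := PySem.List.min?_mem hm
      have : pvReach d (pvRunC d x) m := (pvSeg_mem_iff d x hmem m).mp hmseg
      simpa using hxC.trans this

theorem pvShare_iff_key (d : List (String × String)) (n1 n2 : String) :
    (∃ v, pvReach d n1 v ∧ pvReach d n2 v) ↔ pvCanonKey d n1 = pvCanonKey d n2 := by
  constructor
  · rintro ⟨v, h1, h2⟩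
    exact (pvKey_of_reach d h1).trans (pvKey_of_reach d h2).symm
  · intro h
    exact ⟨pvCanonKey d n1, pvReach_key d n1, h ▸ pvReach_key d n2⟩

-- ---------- A's ancestor sets are the reachable sets ----------

theorem pvAncLoop_none {d : List (String × String)} {anc seen : PySem.Set String} {cur : String}
    (h : (PySem.Dict.mk d).get? cur = none) : pvAncLoop d anc cur seen = anc := by
  rw [pvAncLoop]; split <;> simp_all

theorem pvAncLoop_mem {d : List (String × String)} {anc seen : PySem.Set String} {cur : String}
    {p : String} (h : (PySem.Dict.mk d).get? cur = some p)
    (hm : PySem.Set.contains seen cur = true) : pvAncLoop d anc cur seen = anc := by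
  rw [pvAncLoop]; split <;> simp_all

theorem pvAncLoop_step {d : List (String × String)} {anc seen : PySem.Set String} {cur : String}
    {p : String} (h : (PySem.Dict.mk d).get? cur = some p)
    (hm : ¬ PySem.Set.contains seen cur = true) :
    pvAncLoop d anc cur seen = pvAncLoop d (PySem.Set.add anc p) p (PySem.Set.add seen cur) := by
  conv_lhs => rw [pvAncLoop]
  split
  · rename_i p' hp'
    rw [h] at hp'; cases hp'
    rw [dif_neg hm]
  · simp_all

-- pvAncLoop runs in lock step with pvCanonLoop, collecting the same elements
theorem pvAncLoop_mem_iff (d : List (String × String)) :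
    ∀ (seen : List String) (cur : String) (anc : PySem.Set String),
      (∀ v, v ∈ anc ↔ v ∈ seen ++ [cur]) →
      ∀ v, v ∈ pvAncLoop d anc cur seen ↔
        v ∈ (pvCanonLoop d seen cur).1 ++ [(pvCanonLoop d seen cur).2] := by
  intro seen cur
  induction seen, cur using pvCanonLoop.induct d with
  | case1 seen cur p hp hm =>
      intro anc hanc v
      rw [pvAncLoop_mem hp (by rw [PySem.Set.contains_eq_listContains]; simpa using hm),
        pvCanonLoop_mem hp hm]
      exact hanc v
  | case2 seen cur p hp hm ih =>
      intro anc hanc v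
      have hmc : ¬ PySem.Set.contains seen cur = true := by
        rw [PySem.Set.contains_eq_listContains]; simpa using hm
      rw [pvAncLoop_step hp hmc, pvCanonLoop_step hp hm,
        show PySem.Set.add seen cur = seen ++ [cur] from PySem.Set.add_of_not_mem hm]
      apply ih
      intro w
      rw [PySem.Set.mem_add, hanc w]
      simp [or_assoc]
  | case3 seen cur hp =>
      intro anc hanc v
      rw [pvAncLoop_none hp, pvCanonLoop_none hp]
      exact hanc v

theorem pvMem_ancestors_iff (d : List (String × String)) (x v : String) :
    v ∈ pvAncestors d x ↔ pvReach d x v := by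
  rw [← pvMem_trace_iff_reach]
  unfold pvAncestors pvTrace pvRunS pvRunC
  exact pvAncLoop_mem_iff d [] x (PySem.Set.ofList [x]) (by simp) v

theorem pvInter_ne_iff (S T : PySem.Set String) :
    (!(PySem.Set.inter S T).isEmpty) = true ↔ ∃ v, v ∈ S ∧ v ∈ T := by
  constructor
  · intro h
    have hne : PySem.Set.inter S T ≠ [] := by
      intro he; rw [he] at h; simp at h
    obtain ⟨v, hv⟩ := List.exists_mem_of_ne_nil _ hne
    exact ⟨v, (PySem.Set.mem_inter S T v).mp hv⟩
  · rintro ⟨v, hS, hT⟩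
    have hv : v ∈ PySem.Set.inter S T := (PySem.Set.mem_inter S T v).mpr ⟨hS, hT⟩
    cases hi : PySem.Set.inter S T with
    | nil => rw [hi] at hv; simp at hv
    | cons a t => rfl

-- the heart of the equivalence: two classes share an ancestor iff they get the same key
theorem pvShare_anc_iff_key (d : List (String × String)) (n1 n2 : String) :
    (!(PySem.Set.inter (pvAncestors d n1) (pvAncestors d n2)).isEmpty) = true ↔
      pvCanonKey d n1 = pvCanonKey d n2 := by
  rw [pvInter_ne_iff, ← pvShare_iff_key d n1 n2]
  constructor
  · rintro ⟨v, h1, h2⟩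
    exact ⟨v, (pvMem_ancestors_iff d n1 v).mp h1, (pvMem_ancestors_iff d n2 v).mp h2⟩
  · rintro ⟨v, h1, h2⟩
    exact ⟨v, (pvMem_ancestors_iff d n1 v).mpr h1, (pvMem_ancestors_iff d n2 v).mpr h2⟩

-- ---------- A's nested scan as a peel pass (proof-only intermediate) ----------

def pvCollect (rest : List (String × String × PySem.Set String)) (anc : PySem.Set String)
    (tree : List (String × String)) (remaining : List (String × String × PySem.Set String)) :
    List (String × String) × PySem.Set String × List (String × String × PySem.Set String) :=
  match rest with
  | [] => (tree, anc, remaining)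
  | x :: ys =>
      if !(PySem.Set.inter anc x.2.2).isEmpty then
        pvCollect ys (PySem.Set.union anc x.2.2) (tree ++ [(x.1, x.2.1)]) remaining
      else
        pvCollect ys anc tree (remaining ++ [x])

theorem pvCollect_remaining_le (rest : List (String × String × PySem.Set String))
    (anc : PySem.Set String) (tree : List (String × String))
    (remaining : List (String × String × PySem.Set String)) :
    (pvCollect rest anc tree remaining).2.2.length ≤ remaining.length + rest.length := by
  induction rest generalizing anc tree remaining with
  | nil => simp [pvCollect]
  | cons x ys ih =>
      simp only [pvCollect]
      split
      · have h := ih (PySem.Set.union anc x.2.2) (tree ++ [(x.1, x.2.1)]) remaining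
        simp only [List.length_cons]
        omega
      · have h := ih anc tree (remaining ++ [x])
        simp only [List.length_append, List.length_cons, List.length_nil] at h
        simp only [List.length_cons]
        omega

def pvAltGo (items : List (String × String × PySem.Set String))
    (trees : List (List (String × String))) : List (List (String × String)) :=
  match items with
  | [] => trees
  | x :: rest =>
      let r := pvCollect rest x.2.2 [(x.1, x.2.1)] []
      pvAltGo r.2.2 (trees ++ [r.1])
termination_by items.length
decreasing_by
  have h := pvCollect_remaining_le rest x.2.2 [(x.1, x.2.1)] []
  simp only [List.length_nil, Nat.zero_add] at h
  simp only [List.length_cons]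
  omega

-- proof-only view of an enumerated class_info entry as a (path, gen, ancestors) item
def pvStrip (d : List (String × String)) (e : Int × (String × String × String)) :
    String × String × PySem.Set String :=
  (e.2.1, e.2.2.2, pvAncestors d e.2.2.1)

-- proof-only shorthand for "index not yet assigned" as a Bool filter predicate
def pvUn (S : PySem.Set Int) (e : Int × (String × String × String)) : Bool :=
  !(decide (e.1 ∈ S))

theorem pvInnerStep_skip (d : List (String × String)) (tree : List (String × String))
    (S : PySem.Set Int) (anc : PySem.Set String) (je : Int × (String × String × String))
    (h : je.1 ∈ S) :
    pvInnerStep d (tree, S, anc) je = (tree, S, anc) := by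
  simp [pvInnerStep, h]

theorem pvInnerStep_join (d : List (String × String)) (tree : List (String × String))
    (S : PySem.Set Int) (anc : PySem.Set String) (je : Int × (String × String × String))
    (h1 : je.1 ∉ S) (h2 : PySem.Set.inter anc (pvAncestors d je.2.2.1) ≠ []) :
    pvInnerStep d (tree, S, anc) je
      = (tree ++ [(je.2.1, je.2.2.2)], PySem.Set.add S je.1,
         PySem.Set.union anc (pvAncestors d je.2.2.1)) := by
  simp [pvInnerStep, h1, h2]

theorem pvInnerStep_pass (d : List (String × String)) (tree : List (String × String))
    (S : PySem.Set Int) (anc : PySem.Set String) (je : Int × (String × String × String))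
    (h1 : je.1 ∉ S) (h2 : PySem.Set.inter anc (pvAncestors d je.2.2.1) = []) :
    pvInnerStep d (tree, S, anc) je = (tree, S, anc) := by
  simp [pvInnerStep, h1, h2]

theorem pvOuterStep_skip (d : List (String × String)) (ci : List (String × String × String))
    (trees : List (List (String × String))) (S : PySem.Set Int)
    (ie : Int × (String × String × String)) (h : ie.1 ∈ S) :
    pvOuterStep d ci (trees, S) ie = (trees, S) := by
  simp [pvOuterStep, h]

theorem pvOuterStep_new (d : List (String × String)) (ci : List (String × String × String))
    (trees : List (List (String × String))) (S : PySem.Set Int)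
    (ie : Int × (String × String × String)) (h : ie.1 ∉ S) :
    pvOuterStep d ci (trees, S) ie
      = (trees ++ [((PySem.List.enumerate ci 0).foldl (pvInnerStep d)
            ([(ie.2.1, ie.2.2.2)], PySem.Set.add S ie.1, pvAncestors d ie.2.2.1)).1],
         ((PySem.List.enumerate ci 0).foldl (pvInnerStep d)
            ([(ie.2.1, ie.2.2.2)], PySem.Set.add S ie.1, pvAncestors d ie.2.2.1)).2.1) := by
  simp [pvOuterStep, h]

theorem pvCollect_cons_join (q h : String) (a : PySem.Set String)
    (ys : List (String × String × PySem.Set String)) (anc : PySem.Set String)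
    (tree : List (String × String)) (rem : List (String × String × PySem.Set String))
    (hcond : PySem.Set.inter anc a ≠ []) :
    pvCollect ((q, h, a) :: ys) anc tree rem
      = pvCollect ys (PySem.Set.union anc a) (tree ++ [(q, h)]) rem := by
  simp [pvCollect, hcond]

theorem pvCollect_cons_pass (q h : String) (a : PySem.Set String)
    (ys : List (String × String × PySem.Set String)) (anc : PySem.Set String)
    (tree : List (String × String)) (rem : List (String × String × PySem.Set String))
    (hcond : PySem.Set.inter anc a = []) :
    pvCollect ((q, h, a) :: ys) anc tree rem = pvCollect ys anc tree (rem ++ [(q, h, a)]) := by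
  simp [pvCollect, hcond]

theorem pvAltGo_cons (q h : String) (a : PySem.Set String)
    (rest : List (String × String × PySem.Set String)) (trees : List (List (String × String))) :
    pvAltGo ((q, h, a) :: rest) trees
      = pvAltGo (pvCollect rest a [(q, h)] []).2.2
          (trees ++ [(pvCollect rest a [(q, h)] []).1]) := by
  rw [pvAltGo]

-- A's inner loop skips a prefix whose indices are all already assigned
theorem pvInner_skip (d : List (String × String))
    (l1 l2 : List (Int × (String × String × String)))
    (st : List (String × String) × PySem.Set Int × PySem.Set String)
    (h : ∀ e ∈ l1, e.1 ∈ st.2.1) :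
    (l1 ++ l2).foldl (pvInnerStep d) st = l2.foldl (pvInnerStep d) st := by
  induction l1 generalizing st with
  | nil => rfl
  | cons e l1 ih =>
      have hstep : pvInnerStep d st e = st := by
        rw [show st = (st.1, st.2.1, st.2.2) from rfl]
        exact pvInnerStep_skip d st.1 st.2.1 st.2.2 e (h e (by simp))
      rw [List.cons_append, List.foldl_cons, hstep]
      exact ih st (fun e' he' => h e' (by simp [he']))

-- A's inner loop over the not-yet-assigned entries IS the collect pass
theorem pvInner_eq (d : List (String × String))
    (es : List (Int × (String × String × String)))
    (tree : List (String × String)) (S : PySem.Set Int) (anc : PySem.Set String)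
    (rem : List (String × String × PySem.Set String))
    (hnd : (es.map Prod.fst).Nodup) :
    (es.foldl (pvInnerStep d) (tree, S, anc)).1
        = (pvCollect ((es.filter (pvUn S)).map (pvStrip d)) anc tree rem).1
    ∧ (es.foldl (pvInnerStep d) (tree, S, anc)).2.2
        = (pvCollect ((es.filter (pvUn S)).map (pvStrip d)) anc tree rem).2.1
    ∧ (pvCollect ((es.filter (pvUn S)).map (pvStrip d)) anc tree rem).2.2
        = rem ++ (es.filter (pvUn ((es.foldl (pvInnerStep d) (tree, S, anc)).2.1))).map (pvStrip d)
    ∧ (∀ x ∈ S, x ∈ (es.foldl (pvInnerStep d) (tree, S, anc)).2.1)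
    ∧ (∀ x ∈ (es.foldl (pvInnerStep d) (tree, S, anc)).2.1, x ∈ S ∨ x ∈ es.map Prod.fst) := by
  induction es generalizing tree S anc rem with
  | nil => simp [pvCollect]
  | cons e es ih =>
      have hnd0 := List.nodup_cons.mp (show (e.1 :: es.map Prod.fst).Nodup by simpa using hnd)
      have hnotmem : e.1 ∉ es.map Prod.fst := hnd0.1
      by_cases hS : e.1 ∈ S
      · -- already assigned: skipped on both sides
        rw [List.foldl_cons, pvInnerStep_skip d tree S anc e hS]
        have hfe : (e :: es).filter (pvUn S) = es.filter (pvUn S) := by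
          simp [pvUn, hS]
        rw [hfe]
        obtain ⟨h1, h2, h3, h4, h5⟩ := ih tree S anc rem hnd0.2
        refine ⟨h1, h2, ?_, h4, ?_⟩
        · rw [h3]
          congr 1
          have hmemR : e.1 ∈ (es.foldl (pvInnerStep d) (tree, S, anc)).2.1 := h4 e.1 hS
          simp [pvUn, hmemR]
        · intro x hx
          rcases h5 x hx with h | h
          · exact Or.inl h
          · exact Or.inr (by simp [h])
      · have hfe : (e :: es).filter (pvUn S) = e :: es.filter (pvUn S) := by
          simp [pvUn, hS]
        have hstrip : pvStrip d e = (e.2.1, e.2.2.2, pvAncestors d e.2.2.1) := rfl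
        have hfilt : es.filter (pvUn (PySem.Set.add S e.1)) = es.filter (pvUn S) := by
          apply List.filter_congr
          intro e' he'
          have hne : e'.1 ≠ e.1 := fun hEq => hnotmem (hEq ▸ (List.mem_map.mpr ⟨e', he', rfl⟩))
          simp [pvUn, PySem.Set.mem_add, hne]
        by_cases hint : PySem.Set.inter anc (pvAncestors d e.2.2.1) = []
        · -- e does not join: it goes to `remaining` and stays unassigned
          rw [List.foldl_cons, pvInnerStep_pass d tree S anc e hS hint, hfe, List.map_cons, hstrip,
            pvCollect_cons_pass e.2.1 e.2.2.2 (pvAncestors d e.2.2.1) _ anc tree rem hint]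
          obtain ⟨h1, h2, h3, h4, h5⟩ := ih tree S anc
            (rem ++ [(e.2.1, e.2.2.2, pvAncestors d e.2.2.1)]) hnd0.2
          refine ⟨h1, h2, ?_, h4, ?_⟩
          · rw [h3, List.append_assoc]
            congr 1
            have hnm : e.1 ∉ (es.foldl (pvInnerStep d) (tree, S, anc)).2.1 := fun hmem =>
              ((h5 e.1 hmem).elim hS hnotmem)
            simp [pvUn, hnm, pvStrip]
          · intro x hx
            rcases h5 x hx with h | h
            · exact Or.inl h
            · exact Or.inr (by simp [h])
        · -- e joins the tree on both sides
          rw [List.foldl_cons, pvInnerStep_join d tree S anc e hS hint, hfe, List.map_cons, hstrip,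
            pvCollect_cons_join e.2.1 e.2.2.2 (pvAncestors d e.2.2.1) _ anc tree rem hint]
          obtain ⟨h1, h2, h3, h4, h5⟩ := ih (tree ++ [(e.2.1, e.2.2.2)]) (PySem.Set.add S e.1)
            (PySem.Set.union anc (pvAncestors d e.2.2.1)) rem hnd0.2
          rw [hfilt] at h1 h2 h3
          refine ⟨h1, h2, ?_, ?_, ?_⟩
          · rw [h3]
            congr 1
            have hmemR : e.1 ∈ (es.foldl (pvInnerStep d) (tree ++ [(e.2.1, e.2.2.2)],
                PySem.Set.add S e.1, PySem.Set.union anc (pvAncestors d e.2.2.1))).2.1 :=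
              h4 e.1 ((PySem.Set.mem_add S e.1 e.1).mpr (Or.inr rfl))
            simp [pvUn, hmemR]
          · exact fun x hx => h4 x ((PySem.Set.mem_add S e.1 x).mpr (Or.inl hx))
          · intro x hx
            rcases h5 x hx with h | h
            · rcases (PySem.Set.mem_add S e.1 x).mp h with h' | h'
              · exact Or.inl h'
              · exact Or.inr (by simp [h'])
            · exact Or.inr (by simp [h])

-- A's outer loop, from any reachable state, IS the peel loop over the unassigned entries
theorem pvOuter_eq (d : List (String × String)) (class_info : List (String × String × String))
    (es pre : List (Int × (String × String × String))) (S : PySem.Set Int)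
    (trees : List (List (String × String)))
    (hfull : PySem.List.enumerate class_info 0 = pre ++ es)
    (hnd : ((pre ++ es).map Prod.fst).Nodup)
    (hpre : ∀ e ∈ pre, e.1 ∈ S) :
    (es.foldl (pvOuterStep d class_info) (trees, S)).1
      = pvAltGo ((es.filter (pvUn S)).map (pvStrip d)) trees := by
  induction es generalizing pre S trees with
  | nil => simp [pvAltGo]
  | cons e es ih =>
      have hnd2 : ((e :: es).map Prod.fst).Nodup := by
        rw [List.map_append] at hnd
        exact hnd.sublist (List.sublist_append_right _ _)
      have hnd0 := List.nodup_cons.mp (show (e.1 :: es.map Prod.fst).Nodup by simpa using hnd2)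
      have hnotmem : e.1 ∉ es.map Prod.fst := hnd0.1
      by_cases hS : e.1 ∈ S
      · rw [List.foldl_cons, pvOuterStep_skip d class_info trees S e hS]
        have hfe : (e :: es).filter (pvUn S) = es.filter (pvUn S) := by
          simp [pvUn, hS]
        rw [hfe]
        exact ih (pre ++ [e]) S trees (by simpa using hfull) (by simpa using hnd)
          (fun e' he' => (List.mem_append.mp he').elim (hpre e')
            (fun h => by simp at h; exact h ▸ hS))
      · rw [List.foldl_cons, pvOuterStep_new d class_info trees S e hS]
        have hskip : (PySem.List.enumerate class_info 0).foldl (pvInnerStep d)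
              ([(e.2.1, e.2.2.2)], PySem.Set.add S e.1, pvAncestors d e.2.2.1)
            = es.foldl (pvInnerStep d)
              ([(e.2.1, e.2.2.2)], PySem.Set.add S e.1, pvAncestors d e.2.2.1) := by
          rw [hfull, show pre ++ e :: es = (pre ++ [e]) ++ es from by simp]
          apply pvInner_skip
          intro e' he'
          rcases List.mem_append.mp he' with h | h
          · exact (PySem.Set.mem_add S e.1 e'.1).mpr (Or.inl (hpre e' h))
          · simp at h
            exact h ▸ (PySem.Set.mem_add S e.1 e.1).mpr (Or.inr rfl)
        rw [hskip]
        obtain ⟨h1, h2, h3, h4, h5⟩ := pvInner_eq d es [(e.2.1, e.2.2.2)] (PySem.Set.add S e.1)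
          (pvAncestors d e.2.2.1) [] hnd0.2
        have hfilt : es.filter (pvUn (PySem.Set.add S e.1)) = es.filter (pvUn S) := by
          apply List.filter_congr
          intro e' he'
          have hne : e'.1 ≠ e.1 := fun hEq => hnotmem (hEq ▸ (List.mem_map.mpr ⟨e', he', rfl⟩))
          simp [pvUn, PySem.Set.mem_add, hne]
        rw [hfilt] at h1 h2 h3
        set R := es.foldl (pvInnerStep d)
          ([(e.2.1, e.2.2.2)], PySem.Set.add S e.1, pvAncestors d e.2.2.1) with hR
        have hrec := ih (pre ++ [e]) R.2.1 (trees ++ [R.1]) (by simpa using hfull)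
          (by simpa using hnd)
          (by intro e' he'
              rcases List.mem_append.mp he' with h | h
              · exact h4 e'.1 ((PySem.Set.mem_add S e.1 e'.1).mpr (Or.inl (hpre e' h)))
              · simp at h
                exact h ▸ h4 e.1 ((PySem.Set.mem_add S e.1 e.1).mpr (Or.inr rfl)))
        rw [hrec]
        have hfe : (e :: es).filter (pvUn S) = e :: es.filter (pvUn S) := by
          simp [pvUn, hS]
        rw [hfe, List.map_cons, show pvStrip d e = (e.2.1, e.2.2.2, pvAncestors d e.2.2.1) from rfl,
          pvAltGo_cons e.2.1 e.2.2.2 (pvAncestors d e.2.2.1) _ trees, h3, ← h1]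
        simp

-- stripping the enumeration gives the (path, gen, ancestors) items
theorem pvMap_strip_enumerate (d : List (String × String)) (xs : List (String × String × String))
    (s : Int) :
    (PySem.List.enumerate xs s).map (pvStrip d)
      = xs.map (fun y => (y.1, y.2.2, pvAncestors d y.2.1)) := by
  induction xs generalizing s with
  | nil => simp [PySem.List.enumerate_nil]
  | cons x xs ih => simp [PySem.List.enumerate_cons, pvStrip, ih]

theorem pvNodup_fst_enumerate (xs : List (String × String × String)) :
    ((PySem.List.enumerate xs 0).map Prod.fst).Nodup := by
  have h := PySem.List.pairwise_lt_enumerate xs (0 : Int)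
  have hp : ((PySem.List.enumerate xs 0).map Prod.fst).Pairwise (· < ·) := by
    rw [List.pairwise_map]
    exact h
  exact hp.imp ne_of_lt

-- ---------- the peel pass groups by the canonical key ----------

def pvTrip (d : List (String × String)) (cp : String × String) :
    String × String × PySem.Set String :=
  (cp.1, cp.2, pvAncestors d (pvLastComp cp.1))

def pvK (d : List (String × String)) (cp : String × String) : String :=
  pvCanonKey d (pvLastComp cp.1)

theorem pvCollect_group (d : List (String × String)) (k0 : String) :
    ∀ (tl : List (String × String)) (anc : PySem.Set String)
      (tree : List (String × String)) (rem : List (String × String × PySem.Set String)),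
      (∀ name : String,
        ((!(PySem.Set.inter anc (pvAncestors d name)).isEmpty) = true ↔
          pvCanonKey d name = k0)) →
      (pvCollect (tl.map (pvTrip d)) anc tree rem).1
          = tree ++ tl.filter (fun q => pvK d q == k0)
        ∧ (pvCollect (tl.map (pvTrip d)) anc tree rem).2.2
          = rem ++ (tl.filter (fun q => !(pvK d q == k0))).map (pvTrip d) := by
  intro tl
  induction tl with
  | nil => intro anc tree rem _; simp [pvCollect]
  | cons q tl ih =>
      intro anc tree rem hanc
      have hq := hanc (pvLastComp q.1)
      by_cases hk : pvK d q = k0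
      · have hcond : PySem.Set.inter anc (pvAncestors d (pvLastComp q.1)) ≠ [] := by
          have hb := hq.mpr hk
          intro he; rw [he] at hb; simp at hb
        rw [List.map_cons,
          show pvTrip d q = (q.1, q.2, pvAncestors d (pvLastComp q.1)) from rfl,
          pvCollect_cons_join _ _ _ _ _ _ _ hcond]
        have hanc' : ∀ name : String,
            ((!(PySem.Set.inter (PySem.Set.union anc (pvAncestors d (pvLastComp q.1)))
              (pvAncestors d name)).isEmpty) = true ↔ pvCanonKey d name = k0) := by
          intro name
          rw [pvInter_ne_iff]
          constructor
          · rintro ⟨v, hvU, hvN⟩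
            rcases (PySem.Set.mem_union anc _ v).mp hvU with h | h
            · exact (hanc name).mp ((pvInter_ne_iff _ _).mpr ⟨v, h, hvN⟩)
            · have hkk := (pvShare_anc_iff_key d (pvLastComp q.1) name).mp
                ((pvInter_ne_iff _ _).mpr ⟨v, h, hvN⟩)
              rw [← hkk]; exact hk
          · intro hkey
            obtain ⟨v, hv1, hv2⟩ := (pvInter_ne_iff _ _).mp ((hanc name).mpr hkey)
            exact ⟨v, (PySem.Set.mem_union anc _ v).mpr (Or.inl hv1), hv2⟩
        obtain ⟨H1, H2⟩ := ih (PySem.Set.union anc (pvAncestors d (pvLastComp q.1)))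
          (tree ++ [(q.1, q.2)]) rem hanc'
        constructor
        · rw [H1, List.filter_cons_of_pos (by simpa using hk)]
          simp
        · rw [H2, List.filter_cons_of_neg (by simpa using hk)]
      · have hcond : PySem.Set.inter anc (pvAncestors d (pvLastComp q.1)) = [] := by
          cases he : PySem.Set.inter anc (pvAncestors d (pvLastComp q.1)) with
          | nil => rfl
          | cons a t =>
              exact absurd (hq.mp (by rw [he]; rfl)) hk
        rw [List.map_cons,
          show pvTrip d q = (q.1, q.2, pvAncestors d (pvLastComp q.1)) from rfl,
          pvCollect_cons_pass _ _ _ _ _ _ _ hcond]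
        obtain ⟨H1, H2⟩ := ih anc tree (rem ++ [(q.1, q.2, pvAncestors d (pvLastComp q.1))]) hanc
        constructor
        · rw [H1, List.filter_cons_of_neg (by simpa using hk)]
        · rw [H2, List.filter_cons_of_pos (by simpa using hk)]
          simp [pvTrip]

def pvGroupPeel (d : List (String × String)) (l : List (String × String)) :
    List (List (String × String)) :=
  match l with
  | [] => []
  | cp :: tl =>
      (cp :: tl.filter (fun q => pvK d q == pvK d cp)) ::
        pvGroupPeel d (tl.filter (fun q => !(pvK d q == pvK d cp)))
termination_by l.length
decreasing_by
  simp only [List.length_cons, List.length_unattach]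
  exact Nat.lt_succ_of_le (le_trans (List.length_filter_le _ _) (by simp))

theorem pvGroupPeel_cons (d : List (String × String)) (cp : String × String)
    (tl : List (String × String)) :
    pvGroupPeel d (cp :: tl)
      = (cp :: tl.filter (fun q => pvK d q == pvK d cp)) ::
          pvGroupPeel d (tl.filter (fun q => !(pvK d q == pvK d cp))) := by
  rw [pvGroupPeel.eq_def]

theorem pvGroupPeel_nil (d : List (String × String)) : pvGroupPeel d [] = [] := by
  rw [pvGroupPeel.eq_def]

theorem pvAltGo_group_aux (d : List (String × String)) :
    ∀ (n : Nat) (l : List (String × String)) (trees : List (List (String × String))),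
      l.length ≤ n → pvAltGo (l.map (pvTrip d)) trees = trees ++ pvGroupPeel d l := by
  intro n
  induction n with
  | zero =>
      intro l trees hl
      cases l with
      | nil => simp [pvAltGo, pvGroupPeel_nil]
      | cons a t => simp at hl
  | succ n ih =>
      intro l trees hl
      cases l with
      | nil => simp [pvAltGo, pvGroupPeel_nil]
      | cons cp tl =>
          rw [List.map_cons,
            show pvTrip d cp = (cp.1, cp.2, pvAncestors d (pvLastComp cp.1)) from rfl,
            pvAltGo_cons]
          have hanc : ∀ name : String,
              ((!(PySem.Set.inter (pvAncestors d (pvLastComp cp.1))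
                (pvAncestors d name)).isEmpty) = true ↔ pvCanonKey d name = pvK d cp) := by
            intro name
            rw [pvShare_anc_iff_key d (pvLastComp cp.1) name]
            exact eq_comm
          obtain ⟨H1, H2⟩ := pvCollect_group d (pvK d cp) tl
            (pvAncestors d (pvLastComp cp.1)) [(cp.1, cp.2)] [] hanc
          rw [H1, H2]
          simp only [List.nil_append]
          have htl : tl.length ≤ n := by simp at hl; omega
          have hrec := ih (tl.filter (fun q => !(pvK d q == pvK d cp)))
            (trees ++ [(cp.1, cp.2) :: tl.filter (fun q => pvK d q == pvK d cp)])
            ((List.length_filter_le _ _).trans htl)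
          rw [show ([(cp.1, cp.2)] ++ tl.filter (fun q => pvK d q == pvK d cp))
              = (cp.1, cp.2) :: tl.filter (fun q => pvK d q == pvK d cp) from rfl]
          rw [hrec, pvGroupPeel_cons]
          simp

theorem pvAltGo_group (d : List (String × String)) (l : List (String × String)) :
    pvAltGo (l.map (pvTrip d)) [] = pvGroupPeel d l := by
  have := pvAltGo_group_aux d l.length l [] (le_refl _)
  simpa using this

-- removing one key from a deduplicated key list
theorem pvOfList_filter (k0 : String) :
    ∀ ks : List String,
      PySem.Set.ofList (ks.filter (fun k => !(k == k0)))
        = PySem.Set.discard (PySem.Set.ofList ks) k0 := by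
  intro ks
  induction ks with
  | nil => rfl
  | cons k ks ih =>
      by_cases hk : k = k0
      · subst hk
        rw [List.filter_cons_of_neg (by simp), ih, PySem.Set.ofList_cons]
        show PySem.Set.discard (PySem.Set.ofList ks) k
          = List.filter (fun y => !(y == k)) (k :: List.filter (fun y => !(y == k)) (PySem.Set.ofList ks))
        rw [List.filter_cons_of_neg (by simp), List.filter_filter]
        simp only [Bool.and_self]
        rfl
      · rw [List.filter_cons_of_pos (by simp [hk]), PySem.Set.ofList_cons, PySem.Set.ofList_cons, ih]
        show k :: List.filter (fun y => !(y == k)) (List.filter (fun y => !(y == k0)) (PySem.Set.ofList ks))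
          = List.filter (fun y => !(y == k0)) (k :: List.filter (fun y => !(y == k)) (PySem.Set.ofList ks))
        rw [List.filter_cons_of_pos (by simp [hk]), List.filter_filter, List.filter_filter]
        congr 1
        apply List.filter_congr
        intro a _
        rw [Bool.and_comm]

theorem pvGroupPeel_eq_aux (d : List (String × String)) :
    ∀ (n : Nat) (l : List (String × String)), l.length ≤ n →
      pvGroupPeel d l
        = (PySem.Set.ofList (l.map (pvK d))).map
            (fun k => l.filter (fun q => pvK d q == k)) := by
  intro n
  induction n with
  | zero =>
      intro l hl
      cases l with
      | nil => simp [pvGroupPeel_nil]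
      | cons a t => simp at hl
  | succ n ih =>
      intro l hl
      cases l with
      | nil => simp [pvGroupPeel_nil]
      | cons cp tl =>
          have htl : tl.length ≤ n := by simp at hl; omega
          rw [pvGroupPeel_cons, List.map_cons, PySem.Set.ofList_cons, List.map_cons,
            List.filter_cons_of_pos (by simp)]
          congr 1
          rw [ih (tl.filter (fun q => !(pvK d q == pvK d cp)))
            ((List.length_filter_le _ _).trans htl)]
          have hmapf : (tl.filter (fun q => !(pvK d q == pvK d cp))).map (pvK d)
              = (tl.map (pvK d)).filter (fun k => !(k == pvK d cp)) := by
            rw [List.filter_map]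
            rfl
          have hkeys : PySem.Set.ofList ((tl.filter (fun q => !(pvK d q == pvK d cp))).map (pvK d))
              = PySem.Set.discard (PySem.Set.ofList (tl.map (pvK d))) (pvK d cp) := by
            rw [hmapf, pvOfList_filter]
          rw [hkeys]
          apply List.map_congr_left
          intro k hk
          have hkne : k ≠ pvK d cp := ((PySem.Set.mem_discard _ _ _).mp hk).2
          rw [List.filter_cons_of_neg (by simp [Ne.symm hkne]), List.filter_filter]
          apply List.filter_congr
          intro q _
          by_cases hq : pvK d q = k
          · simp [hq, hkne]
          · simp [hq]



-- ---------- B's dict group-by in closed form ----------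

theorem pvAlt_closed (class_list : List (String × String)) (d : List (String × String)) :
    split_into_inheritance_trees_py_alt class_list d
      = (PySem.Set.ofList (class_list.map (pvK d))).map
          (fun k => class_list.filter (fun q => pvK d q == k)) := by
  unfold split_into_inheritance_trees_py_alt
  rw [show (fun (g : PySem.Dict String (List (String × String))) (cp : String × String) =>
      g.modify (pvCanonKey d (pvLastComp cp.1)) [] (fun v => v ++ [cp]))
    = (fun g cp => g.modify (pvK d cp) [] (fun v => v ++ [cp])) from rfl]
  set G := class_list.foldl
    (fun g cp => g.modify (pvK d cp) [] (fun v => v ++ [cp]))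
    (PySem.Dict.empty : PySem.Dict String (List (String × String))) with hG
  have hkeys : G.keys = PySem.Set.ofList (class_list.map (pvK d)) := by
    rw [hG, PySem.Dict.keys_foldl_modify_key class_list (pvK d) []
      (fun _ cp => fun v => v ++ [cp]) PySem.Dict.empty]
    rw [PySem.Dict.keys_empty, PySem.Set.update_nil_left]
  have hnodup : G.keys.Nodup := by
    rw [hkeys]
    exact PySem.Set.nodup_ofList _
  have hgetD : ∀ k, G.getD k [] = class_list.filter (fun q => pvK d q == k) := by
    intro k
    have hmap : G = (class_list.map (fun cp => (pvK d cp, cp))).foldl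
        (fun g p => g.modify p.1 [] (fun v => v ++ [p.2])) PySem.Dict.empty := by
      rw [hG, List.foldl_map]
    rw [hmap, PySem.Dict.getD_foldl_modify_append, PySem.Dict.getD_empty, List.nil_append,
      List.filter_map, List.map_map]
    rw [show ((fun x : String × (String × String) => x.2) ∘ (fun cp => (pvK d cp, cp)))
      = id from rfl]
    rw [List.map_id]
    rfl
  rw [PySem.Dict.values_eq_map_keys G hnodup [], hkeys]
  exact List.map_congr_left (fun k _ => hgetD k)

-- ===== VERDICT (by name: the statement is the Claim_ definition above) =====
theorem split_into_inheritance_trees_py_spec : Claim_equal_split_into_inheritance_trees_py := by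
  intro class_list child_to_parent _
  unfold Spec_split_into_inheritance_trees_py
  unfold split_into_inheritance_trees_py
  by_cases h1 : class_list.length = 1
  · obtain ⟨c, hc⟩ := List.length_eq_one_iff.mp h1
    subst hc
    rw [pvAlt_closed]
    simp [PySem.Set.ofList_cons, PySem.Set.discard]
  · have hne : (class_list.length == 1) = false := by simpa using h1
    rw [hne]
    simp only [Bool.false_eq_true, if_false]
    rw [pvOuter_eq child_to_parent _ _ [] (PySem.Set.empty) []
      (by simp) (by simpa using pvNodup_fst_enumerate _) (by simp)]
    have hfilt : ∀ (l : List (Int × (String × String × String))),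
        l.filter (pvUn (PySem.Set.empty : PySem.Set Int)) = l := by
      intro l
      apply List.filter_eq_self.mpr
      intro e _
      simp [pvUn, PySem.Set.empty]
    rw [hfilt, pvMap_strip_enumerate, List.map_map]
    rw [show ((fun y : String × String × String => (y.1, y.2.2, pvAncestors child_to_parent y.2.1))
        ∘ (fun cp : String × String => (cp.1, pvLastComp cp.1, cp.2)))
      = pvTrip child_to_parent from rfl]
    rw [pvAltGo_group, pvGroupPeel_eq_aux child_to_parent class_list.length class_list (le_refl _),
      ← pvAlt_closed]
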